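-- pv_equiv track=rewrite | github.com/anders-ahsman/advent-of-code | 2020/day06/main.py | part2
-- ===== SOURCE A (Python) =====
-- import string
--
-- def part2(lines):
--     groups = []
--     answers = []
--     for line in lines:
--         if len(line) > 0:
--             answers.append(line)
--         else:
--             groups.append(answers)
--             answers = []
--     groups.append(answers)
--
--     everybody_yes_sum = 0
--     for group in groups:
--         for letter in string.ascii_lowercase:
--             if all(letter in answer for answer in group):
--                 everybody_yes_sum += 1
--     return everybody_yes_sum
-- ===== SOURCE B (Python) =====
-- import string
--
-- def part2(lines):
--     groups = []
--     answers = []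
--     for line in lines:
--         if len(line) > 0:
--             answers.append(line)
--         else:
--             groups.append(answers)
--             answers = []
--     groups.append(answers)
--
--     total = 0
--     for group in groups:
--         common = set(string.ascii_lowercase)
--         for ans in group:
--             common &= set(ans)
--         total += len(common)
--     return total
-- ===== Notes on version B (the rewrite author's own statement) =====
-- stated objective: alternative
-- what changed: Replaces A's per-group scan over the 26 lowercase letters (each with an all() membership pass over the group's answers) by a single fold intersecting character sets seeded with the full lowercase alphabet; the grouping loop is unchanged.
import Mathlib
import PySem

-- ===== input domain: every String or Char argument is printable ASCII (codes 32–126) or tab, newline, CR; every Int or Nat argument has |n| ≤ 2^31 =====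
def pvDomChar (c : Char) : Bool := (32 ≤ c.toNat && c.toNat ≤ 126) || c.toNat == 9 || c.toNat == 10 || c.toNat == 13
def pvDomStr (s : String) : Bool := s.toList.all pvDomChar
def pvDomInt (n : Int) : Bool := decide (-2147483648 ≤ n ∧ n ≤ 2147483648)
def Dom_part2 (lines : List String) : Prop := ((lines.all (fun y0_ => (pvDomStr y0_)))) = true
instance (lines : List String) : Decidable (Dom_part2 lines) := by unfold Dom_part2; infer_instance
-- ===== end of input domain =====

-- B replaces A's 26-letter scan (one `all` pass over the group per letter) by a single
-- fold intersecting character sets, seeded with the lowercase alphabet (objective: alternative).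

-- string.ascii_lowercase
def pvAlphabet : List Char := "abcdefghijklmnopqrstuvwxyz".toList

-- the grouping loop shared verbatim by A and B (both Pythons contain it unchanged)
def pvGroups (lines : List String) : List (List String) :=
  let st := lines.foldl
    (fun (st : List (List String) × List String) line =>
      if PySem.Str.len line > 0 then (st.1, st.2 ++ [line])
      else (st.1 ++ [st.2], [])) ([], [])
  st.1 ++ [st.2]

-- ===== PORT A =====
-- `letter in answer` for a single-char letter is exactly char membership in the string
def part2 (lines : List String) : Int :=
  (pvGroups lines).foldl
    (fun s group =>
      pvAlphabet.foldl
        (fun s letter =>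
          if group.all (fun answer => answer.toList.contains letter) then s + 1 else s)
        s)
    0

-- ===== PORT B =====
-- set intersection on List Char: sets of distinct chars, len = length
def part2_alt (lines : List String) : Int :=
  (pvGroups lines).foldl
    (fun total group =>
      total +
        ((group.foldl
            (fun common ans => common.filter (fun c => ans.toList.contains c))
            pvAlphabet).length : Int))
    0

-- ===== PRECONDITION & SPEC =====
def Spec_part2 (lines : List String) (out : Int) : Prop := out = part2_alt lines
instance (lines : List String) (out : Int) : Decidable (Spec_part2 lines out) := by unfold Spec_part2; infer_instance

-- ===== CLAIM (what is proved, stated in full; the proofs are below) =====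
def Claim_equal_part2 : Prop := ∀ (lines : List String), Dom_part2 lines → Spec_part2 lines (part2 lines)

-- ===== LEMMAS AND PROOFS =====

-- B's intersection fold computes the filter of the seed by "common to all answers"
theorem pvFold_filter (group : List String) (init : List Char) :
    group.foldl (fun common ans => common.filter (fun c => ans.toList.contains c)) init
      = init.filter (fun c => group.all (fun ans => ans.toList.contains c)) := by
  induction group generalizing init with
  | nil => simp
  | cons a t ih =>
      simp only [List.foldl_cons, ih, List.filter_filter, List.all_cons]
      congr 1
      funext c
      exact Bool.and_comm _ _

-- per-group: A's letter count equals B's intersection size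
theorem pvGroup_eq (group : List String) (s : Int) :
    pvAlphabet.foldl
        (fun s letter =>
          if group.all (fun answer => answer.toList.contains letter) then s + 1 else s) s
      = s + ((group.foldl
            (fun common ans => common.filter (fun c => ans.toList.contains c))
            pvAlphabet).length : Int) := by
  rw [PySem.List.foldl_count_if, pvFold_filter, List.countP_eq_length_filter]

theorem pvSum_eq (gs : List (List String)) (s : Int) :
    gs.foldl
        (fun s group =>
          pvAlphabet.foldl
            (fun s letter =>
              if group.all (fun answer => answer.toList.contains letter) then s + 1 else s)
            s) s
      = gs.foldl
          (fun total group =>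
            total +
              ((group.foldl
                  (fun common ans => common.filter (fun c => ans.toList.contains c))
                  pvAlphabet).length : Int)) s := by
  induction gs generalizing s with
  | nil => rfl
  | cons g t ih =>
      simp only [List.foldl_cons, pvGroup_eq]

-- ===== VERDICT (by name: the statement is the Claim_ definition above) =====
theorem part2_spec : Claim_equal_part2 := by
  intro lines _
  show part2 lines = part2_alt lines
  unfold part2 part2_alt
  exact pvSum_eq _ 0
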